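-- pv_equiv track=rewrite | github.com/K-MarkLee/Coding_Test | 프로그래머스/1/42862. 체육복/체육복.py | solution
-- ===== SOURCE A (Python) =====
-- def solution(n, lost, reserve):
--     new_reserve = [i for i in reserve if i not in lost]
--     new_lost = [i for i in lost if i not in reserve]
--
--     for i in sorted(new_reserve):
--         if i - 1 in new_lost:
--             new_lost.remove(i - 1)
--         elif i + 1 in new_lost:
--             new_lost.remove(i + 1)
--
--     return n - len(new_lost)
-- ===== SOURCE B (Python) =====
-- def solution(n, lost, reserve):
--     # Sort both residual lists once, then match with a single two-pointer sweep.
--     lost_set = set(lost)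
--     reserve_set = set(reserve)
--     L = sorted(i for i in lost if i not in reserve_set)
--     R = sorted(i for i in reserve if i not in lost_set)
--     j = 0
--     matched = 0
--     for r in R:
--         while j < len(L) and L[j] < r - 1:
--             j += 1
--         if j < len(L) and (L[j] == r - 1 or L[j] == r + 1):
--             j += 1
--             matched += 1
--     return n - (len(L) - matched)
-- ===== Notes on version B (the rewrite author's own statement) =====
-- stated objective: faster
-- what changed: Replaces A's per-reserve linear scans and list.remove on the residual lost list with set-based filtering, sorting both residual lists once, and a single two-pointer sweep that only counts matches.
import Mathlib
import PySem

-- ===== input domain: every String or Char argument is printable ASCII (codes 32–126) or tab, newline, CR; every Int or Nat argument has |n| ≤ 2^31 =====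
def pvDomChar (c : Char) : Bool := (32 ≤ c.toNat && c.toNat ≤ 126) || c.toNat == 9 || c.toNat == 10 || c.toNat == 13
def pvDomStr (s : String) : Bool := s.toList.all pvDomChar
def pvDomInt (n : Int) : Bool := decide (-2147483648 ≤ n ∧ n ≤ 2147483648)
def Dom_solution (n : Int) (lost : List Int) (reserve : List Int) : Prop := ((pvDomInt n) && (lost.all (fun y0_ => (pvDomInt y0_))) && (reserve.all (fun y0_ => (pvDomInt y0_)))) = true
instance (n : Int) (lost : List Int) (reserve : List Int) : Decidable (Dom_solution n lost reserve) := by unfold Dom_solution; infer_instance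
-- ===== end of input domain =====

-- B replaces A's quadratic remove-from-list greedy with sort-both-then-one-two-pointer-sweep (alternative algorithm, O((l+r)·l) → O(l log l + r log r)).

-- ===== PORT A =====
-- one iteration of A's for-loop body over the mutable new_lost list
def solAStep (st : List Int) (i : Int) : List Int :=
  if (i - 1) ∈ st then (PySem.List.remove? st (i - 1)).getD st
  else if (i + 1) ∈ st then (PySem.List.remove? st (i + 1)).getD st
  else st

def solution (n : Int) (lost : List Int) (reserve : List Int) : Int :=
  let new_reserve := reserve.filter (fun i => decide (i ∉ lost))
  let new_lost := lost.filter (fun i => decide (i ∉ reserve))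
  let final := (PySem.List.sorted new_reserve (fun x => x) false).foldl solAStep new_lost
  n - (final.length : Int)

-- ===== PORT B =====
-- the inner while loop: advance j past elements of L smaller than r - 1
def bSkip (L : List Int) (r : Int) (j : Nat) : Nat :=
  if h : j < L.length then
    (if L[j] < r - 1 then bSkip L r (j + 1) else j)
  else j
termination_by L.length - j

-- one iteration of B's for-loop body, state = (j, matched)
def bStep (L : List Int) (st : Nat × Nat) (r : Int) : Nat × Nat :=
  let j := bSkip L r st.1
  if h : j < L.length then
    (if L[j] = r - 1 ∨ L[j] = r + 1 then (j + 1, st.2 + 1) else (j, st.2))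
  else (j, st.2)

def solution_alt (n : Int) (lost : List Int) (reserve : List Int) : Int :=
  let lost_set := PySem.Set.ofList lost
  let reserve_set := PySem.Set.ofList reserve
  let L := PySem.List.sorted (lost.filter (fun i => decide (i ∉ reserve_set))) (fun x => x) false
  let R := PySem.List.sorted (reserve.filter (fun i => decide (i ∉ lost_set))) (fun x => x) false
  let res := R.foldl (bStep L) (0, 0)
  n - ((L.length : Int) - (res.2 : Int))

-- ===== PRECONDITION & SPEC =====
def Spec_solution (n : Int) (lost : List Int) (reserve : List Int) (out : Int) : Prop := out = solution_alt n lost reserve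
instance (n : Int) (lost : List Int) (reserve : List Int) (out : Int) : Decidable (Spec_solution n lost reserve out) := by unfold Spec_solution; infer_instance

-- ===== CLAIM (what is proved, stated in full; the proofs are below) =====
def Claim_equal_solution : Prop := ∀ (n : Int) (lost : List Int) (reserve : List Int), Dom_solution n lost reserve → Spec_solution n lost reserve (solution n lost reserve)

-- ===== LEMMAS AND PROOFS =====

-- A's step rewritten with erase
theorem solAStep_eq_erase (st : List Int) (i : Int) :
    solAStep st i =
      if (i - 1) ∈ st then st.erase (i - 1)
      else if (i + 1) ∈ st then st.erase (i + 1)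
      else st := by
  unfold solAStep
  split
  · rename_i h; rw [PySem.List.remove?_eq_some_erase st _ h]; rfl
  · split
    · rename_i h; rw [PySem.List.remove?_eq_some_erase st _ h]; rfl
    · rfl

theorem solAStep_perm (st1 st2 : List Int) (i : Int) (h : st1.Perm st2) :
    (solAStep st1 i).Perm (solAStep st2 i) := by
  rw [solAStep_eq_erase, solAStep_eq_erase]
  by_cases h1 : (i - 1) ∈ st1
  · rw [if_pos h1, if_pos (h.mem_iff.mp h1)]; exact h.erase _
  · rw [if_neg h1, if_neg (fun hc => h1 (h.mem_iff.mpr hc))]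
    by_cases h2 : (i + 1) ∈ st1
    · rw [if_pos h2, if_pos (h.mem_iff.mp h2)]; exact h.erase _
    · rw [if_neg h2, if_neg (fun hc => h2 (h.mem_iff.mpr hc))]; exact h

theorem foldA_perm (R : List Int) (st1 st2 : List Int) (h : st1.Perm st2) :
    (R.foldl solAStep st1).Perm (R.foldl solAStep st2) := by
  induction R generalizing st1 st2 with
  | nil => exact h
  | cons r R ih => exact ih _ _ (solAStep_perm _ _ _ h)

theorem bSkip_ge (L : List Int) (r : Int) (j : Nat) : j ≤ bSkip L r j := by
  rw [bSkip]
  split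
  · split
    · exact Nat.le_trans (Nat.le_succ j) (bSkip_ge L r (j + 1))
    · exact Nat.le_refl j
  · exact Nat.le_refl j
termination_by L.length - j

theorem bSkip_le (L : List Int) (r : Int) (j : Nat) (hj : j ≤ L.length) :
    bSkip L r j ≤ L.length := by
  rw [bSkip]
  split
  · split
    · exact bSkip_le L r (j + 1) (by omega)
    · exact hj
  · exact hj
termination_by L.length - j

theorem bSkip_drop (L : List Int) (r : Int) (j : Nat) :
    L.drop (bSkip L r j) = (L.drop j).dropWhile (fun x => decide (x < r - 1)) := by
  rw [bSkip]
  split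
  · rename_i h
    rw [List.drop_eq_getElem_cons h, List.dropWhile_cons]
    split
    · rename_i hlt
      rw [if_pos (by simpa using hlt)]
      exact bSkip_drop L r (j + 1)
    · rename_i hlt
      rw [if_neg (by simpa using hlt), ← List.drop_eq_getElem_cons h]
  · rename_i h
    rw [List.drop_eq_nil_of_le (by omega)]
    simp
termination_by L.length - j

-- the key invariant: each reserve either skips (A-state unchanged) or matches
-- (A-state shrinks by one, matched grows by one)
theorem main_invariant (L : List Int) (hL : L.Pairwise (· ≤ ·)) :
    ∀ (R : List Int), R.Pairwise (· ≤ ·) → (∀ r ∈ R, r ∉ L) →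
    ∀ (D : List Int) (j m : Nat), j ≤ L.length → (∀ d ∈ D, ∀ r ∈ R, d < r - 1) →
    (R.foldl solAStep (D ++ L.drop j)).length + (R.foldl (bStep L) (j, m)).2
      = (D ++ L.drop j).length + m := by
  intro R
  induction R generalizing hL with
  | nil => intro _ _ D j m _ _; simp
  | cons r R ih =>
    intro hR hdisj D j m hj hD
    have hRp : R.Pairwise (· ≤ ·) := hR.of_cons
    have hrR : ∀ r' ∈ R, r ≤ r' := fun r' hr' => List.rel_of_pairwise_cons hR hr'
    have hdisj' : ∀ r' ∈ R, r' ∉ L := fun r' hr' => hdisj r' (List.mem_cons_of_mem _ hr')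
    have hrL : r ∉ L := hdisj r (by simp)
    set p : Int → Bool := fun x => decide (x < r - 1) with hp
    set j' := bSkip L r j with hj'def
    have hjj' : j ≤ j' := bSkip_ge L r j
    have hj'le : j' ≤ L.length := bSkip_le L r j hj
    have hdrop : L.drop j' = (L.drop j).dropWhile p := bSkip_drop L r j
    set D' := D ++ (L.drop j).takeWhile p with hD'def
    have hst : D ++ L.drop j = D' ++ L.drop j' := by
      rw [hdrop, hD'def, List.append_assoc, List.takeWhile_append_dropWhile]
    have hD'lt : ∀ d ∈ D', d < r - 1 := by
      intro d hd
      rcases List.mem_append.mp hd with hd | hd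
      · exact hD d hd r (by simp)
      · have := List.mem_takeWhile_imp hd
        simpa [hp] using this
    have hD'R : ∀ d ∈ D', ∀ r' ∈ R, d < r' - 1 := by
      intro d hd r' hr'
      have h1 := hD'lt d hd
      have h2 := hrR r' hr'
      omega
    simp only [List.foldl_cons]
    rw [hst]
    by_cases hj'lt : j' < L.length
    · -- suffix nonempty, head x = L[j']
      have hw : L.drop j' = L[j'] :: L.drop (j' + 1) := List.drop_eq_getElem_cons hj'lt
      have hxge : r - 1 ≤ L[j'] := by
        have h1 := List.head?_dropWhile_not p (L.drop j)
        rw [← hdrop, hw] at h1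
        simp only [List.head?_cons] at h1
        simp [hp] at h1
        omega
      have hw'ge : ∀ y ∈ L.drop (j' + 1), L[j'] ≤ y := by
        have hpair : (L.drop j').Pairwise (· ≤ ·) := hL.sublist (List.drop_sublist _ _)
        rw [hw] at hpair
        exact fun y hy => List.rel_of_pairwise_cons hpair hy
      have hxL : L[j'] ∈ L := List.getElem_mem hj'lt
      have hxr : L[j'] ≠ r := fun hc => hrL (hc ▸ hxL)
      have hlen1 : (D' ++ L.drop j').length = (D' ++ L.drop (j' + 1)).length + 1 := by
        rw [hw]; simp; omega
      by_cases hc1 : L[j'] = r - 1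
      · -- match on r - 1
        have hmem : (r - 1) ∈ D' ++ L.drop j' := by
          rw [hw, ← hc1]
          exact List.mem_append_right _ (List.mem_cons_self ..)
        have hA : solAStep (D' ++ L.drop j') r = D' ++ L.drop (j' + 1) := by
          rw [solAStep_eq_erase, if_pos hmem,
              List.erase_append_right _ (fun hc => by have := hD'lt _ hc; omega), hw, ← hc1,
              List.erase_cons_head]
        have hB : bStep L (j, m) r = (j' + 1, m + 1) := by
          unfold bStep
          rw [← hj'def, dif_pos hj'lt, if_pos (Or.inl hc1)]
        rw [hA, hB]
        have hIH := ih hL hRp hdisj' D' (j' + 1) (m + 1) (by omega) hD'R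
        rw [hIH, hlen1]
        omega
      · have hnm1 : (r - 1) ∉ D' ++ L.drop j' := by
          rw [hw]
          intro hc
          rcases List.mem_append.mp hc with hc | hc
          · have := hD'lt _ hc; omega
          · rcases List.mem_cons.mp hc with hc | hc
            · exact hc1 hc.symm
            · have := hw'ge _ hc; omega
        by_cases hc2 : L[j'] = r + 1
        · -- match on r + 1
          have hmem : (r + 1) ∈ D' ++ L.drop j' := by
            rw [hw, ← hc2]
            exact List.mem_append_right _ (List.mem_cons_self ..)
          have hA : solAStep (D' ++ L.drop j') r = D' ++ L.drop (j' + 1) := by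
            rw [solAStep_eq_erase, if_neg hnm1, if_pos hmem,
                List.erase_append_right _ (fun hc => by have := hD'lt _ hc; omega), hw, ← hc2,
                List.erase_cons_head]
          have hB : bStep L (j, m) r = (j' + 1, m + 1) := by
            unfold bStep
            rw [← hj'def, dif_pos hj'lt, if_pos (Or.inr hc2)]
          rw [hA, hB]
          have hIH := ih hL hRp hdisj' D' (j' + 1) (m + 1) (by omega) hD'R
          rw [hIH, hlen1]
          omega
        · -- no match: L[j'] > r + 1
          have hxgt : r + 1 < L[j'] := by
            have h2 : L[j'] ≠ r := hxr
            omega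
          have hnm2 : (r + 1) ∉ D' ++ L.drop j' := by
            rw [hw]
            intro hc
            rcases List.mem_append.mp hc with hc | hc
            · have := hD'lt _ hc; omega
            · rcases List.mem_cons.mp hc with hc | hc
              · exact hc2 hc.symm
              · have := hw'ge _ hc; omega
          have hA : solAStep (D' ++ L.drop j') r = D' ++ L.drop j' := by
            rw [solAStep_eq_erase, if_neg hnm1, if_neg hnm2]
          have hB : bStep L (j, m) r = (j', m) := by
            unfold bStep
            rw [← hj'def, dif_pos hj'lt, if_neg (fun hc => hc.elim hc1 hc2)]
          rw [hA, hB]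
          exact ih hL hRp hdisj' D' j' m hj'le hD'R
    · -- suffix exhausted: A-state unchanged, B does not match
      have hw : L.drop j' = [] := List.drop_eq_nil_of_le (by omega)
      have hA : solAStep (D' ++ L.drop j') r = D' ++ L.drop j' := by
        rw [hw, List.append_nil, solAStep_eq_erase]
        rw [if_neg (fun hc => by have := hD'lt _ hc; omega),
            if_neg (fun hc => by have := hD'lt _ hc; omega)]
      have hB : bStep L (j, m) r = (j', m) := by
        unfold bStep
        rw [← hj'def, dif_neg hj'lt]
      rw [hA, hB]
      exact ih hL hRp hdisj' D' j' m hj'le hD'R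

-- ===== VERDICT (by name: the statement is the Claim_ definition above) =====
theorem solution_spec : Claim_equal_solution := by
  intro n lost reserve _
  unfold Spec_solution solution solution_alt
  dsimp only
  have hfl : lost.filter (fun i => decide (i ∉ PySem.Set.ofList reserve))
      = lost.filter (fun i => decide (i ∉ reserve)) :=
    List.filter_congr (fun x _ => by simp [PySem.Set.mem_ofList])
  have hfr : reserve.filter (fun i => decide (i ∉ PySem.Set.ofList lost))
      = reserve.filter (fun i => decide (i ∉ lost)) :=
    List.filter_congr (fun x _ => by simp [PySem.Set.mem_ofList])
  rw [hfl, hfr]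
  set new_lost := lost.filter (fun i => decide (i ∉ reserve)) with hnl
  set R := PySem.List.sorted (reserve.filter (fun i => decide (i ∉ lost))) (fun x => x) false with hRdef
  set L := PySem.List.sorted new_lost (fun x => x) false with hLdef
  have hperm : new_lost.Perm L := (PySem.List.sorted_perm _ _ _).symm
  have hlen : (R.foldl solAStep new_lost).length = (R.foldl solAStep L).length :=
    (foldA_perm R _ _ hperm).length_eq
  have hL : L.Pairwise (· ≤ ·) :=
    PySem.List.sorted_pairwise new_lost (fun x => x)
  have hR : R.Pairwise (· ≤ ·) :=
    PySem.List.sorted_pairwise (reserve.filter (fun i => decide (i ∉ lost))) (fun x => x)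
  have hdisj : ∀ r ∈ R, r ∉ L := by
    intro r hr hrL
    have hr' : r ∈ reserve.filter (fun i => decide (i ∉ lost)) :=
      (PySem.List.mem_sorted _ _ _ _).mp hr
    have hrl : r ∉ lost := by
      have := List.of_mem_filter hr'
      simpa using this
    have : r ∈ new_lost := (PySem.List.mem_sorted _ _ _ _).mp hrL
    exact hrl (List.mem_of_mem_filter this)
  have hmain := main_invariant L hL R hR hdisj [] 0 0 (Nat.zero_le _) (by simp)
  simp only [List.nil_append, List.drop_zero] at hmain
  have hperm_len : new_lost.length = L.length := hperm.length_eq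
  have hm_le : (R.foldl (bStep L) (0, 0)).2 ≤ L.length := by omega
  simp only [hlen]
  omega
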